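-- pv_equiv track=rewrite | github.com/dscott123/Alistar | Alistar.py | vertcounter
-- ===== SOURCE A (Python) =====
-- def vertcounter(board, x, y, p):
-- 	check = 0
-- 	for z in range(4):
-- 		if y - z - 1 < 0:
-- 			break
-- 		if board[x][y-z-1] != p:
-- 			break
-- 		if board[x][y-z-1] == p:
-- 			check+=1
-- 	return(check)
-- ===== SOURCE B (Python) =====
-- def vertcounter(board, x, y, p):
--     # Loop-free closed form: indicator bits for each of the four cells below,
--     # combined by prefix products (sum of leading ones = run length).
--     def ok(z):
--         i = y - z - 1
--         return 1 if i >= 0 and board[x][i] == p else 0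
--     b1, b2, b3, b4 = ok(0), ok(1), ok(2), ok(3)
--     return b1 + b1 * b2 + b1 * b2 * b3 + b1 * b2 * b3 * b4
-- ===== Notes on version B (the rewrite author's own statement) =====
-- stated objective: alternative
-- what changed: Replaces A's break-laden loop with a loop-free arithmetic closed form: four 0/1 indicator bits for the cells below (x, y), combined as the sum of their prefix products.
import Mathlib
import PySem

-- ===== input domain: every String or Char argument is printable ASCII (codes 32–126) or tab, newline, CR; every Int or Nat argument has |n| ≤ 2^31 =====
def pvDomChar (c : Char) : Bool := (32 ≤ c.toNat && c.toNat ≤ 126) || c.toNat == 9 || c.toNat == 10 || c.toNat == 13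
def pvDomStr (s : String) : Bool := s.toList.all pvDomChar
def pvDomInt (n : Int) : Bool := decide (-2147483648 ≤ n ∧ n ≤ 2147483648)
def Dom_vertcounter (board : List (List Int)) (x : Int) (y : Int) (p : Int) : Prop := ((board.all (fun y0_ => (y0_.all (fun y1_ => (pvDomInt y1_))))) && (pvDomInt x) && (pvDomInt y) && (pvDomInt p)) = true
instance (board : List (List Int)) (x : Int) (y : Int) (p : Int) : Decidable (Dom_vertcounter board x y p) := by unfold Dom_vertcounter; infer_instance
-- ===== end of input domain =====

-- B replaces A's break-laden loop by a loop-free closed form (sum of prefix products of four indicator bits); alternative, same cost.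

-- ===== PORT A =====
-- board[x][y-z-1]; the .getD defaults are only reached where Python raises IndexError (excluded by Pre_)
def pvCell (board : List (List Int)) (x : Int) (i : Int) : Int :=
  (PySem.List.pyGet? ((PySem.List.pyGet? board x).getD []) i).getD 0

-- the for-z loop with its three break/continue branches; an early break returns check directly
def pvALoop (board : List (List Int)) (x : Int) (y : Int) (p : Int) : List Int → Int → Int
  | [], check => check
  | z :: zs, check =>
    if y - z - 1 < 0 then check
    else if pvCell board x (y - z - 1) ≠ p then check
    else if pvCell board x (y - z - 1) = p then pvALoop board x y p zs (check + 1)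
    else pvALoop board x y p zs check

def vertcounter (board : List (List Int)) (x : Int) (y : Int) (p : Int) : Int :=
  pvALoop board x y p (PySem.List.pyRange 0 4 1) 0

-- ===== PORT B =====
-- B's indicator bit: 1 if the cell z steps below exists (index ≥ 0) and holds p
def pvOk (board : List (List Int)) (x : Int) (y : Int) (p : Int) (z : Int) : Int :=
  if 0 ≤ y - z - 1 ∧ pvCell board x (y - z - 1) = p then 1 else 0

def vertcounter_alt (board : List (List Int)) (x : Int) (y : Int) (p : Int) : Int :=
  let b1 := pvOk board x y p 0
  let b2 := pvOk board x y p 1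
  let b3 := pvOk board x y p 2
  let b4 := pvOk board x y p 3
  b1 + b1 * b2 + b1 * b2 * b3 + b1 * b2 * b3 * b4

-- ===== PRECONDITION & SPEC =====
-- Pre_ excludes exactly the inputs on which Python A raises IndexError: some cell below (x,y)
-- is accessed (y ≥ 1) but x is out of range for board or y-1 out of range for board[x].
def Pre_vertcounter (board : List (List Int)) (x : Int) (y : Int) (p : Int) : Prop :=
  y ≤ 0 ∨ (-(board.length : Int) ≤ x ∧ x < (board.length : Int) ∧
           y ≤ (((PySem.List.pyGet? board x).getD []).length : Int))
instance (board : List (List Int)) (x : Int) (y : Int) (p : Int) : Decidable (Pre_vertcounter board x y p) := by unfold Pre_vertcounter; infer_instance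

def pvWitness_vertcounter : List (List Int) × Int × Int × Int := ([[1, 2], [2, 2]], 1, 2, 2)

def Spec_vertcounter (board : List (List Int)) (x : Int) (y : Int) (p : Int) (out : Int) : Prop := out = vertcounter_alt board x y p
instance (board : List (List Int)) (x : Int) (y : Int) (p : Int) (out : Int) : Decidable (Spec_vertcounter board x y p out) := by unfold Spec_vertcounter; infer_instance

-- ===== CLAIM (what is proved, stated in full; the proofs are below) =====
def Claim_equal_vertcounter : Prop := ∀ (board : List (List Int)) (x : Int) (y : Int) (p : Int), Dom_vertcounter board x y p → Pre_vertcounter board x y p → Spec_vertcounter board x y p (vertcounter board x y p)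

-- ===== LEMMAS AND PROOFS =====
lemma pvRange4 : PySem.List.pyRange 0 4 1 = [0, 1, 2, 3] := by decide

-- ===== VERDICT (by name: the statement is the Claim_ definition above) =====
set_option maxHeartbeats 1000000 in
theorem vertcounter_spec : Claim_equal_vertcounter := by
  intro board x y p _ _
  unfold Spec_vertcounter vertcounter vertcounter_alt
  rw [pvRange4]
  simp only [pvALoop, pvOk]
  generalize pvCell board x (y - 0 - 1) = c0
  generalize pvCell board x (y - 1 - 1) = c1
  generalize pvCell board x (y - 2 - 1) = c2
  generalize pvCell board x (y - 3 - 1) = c3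
  -- every condition is now linear over Int variables; case on the four cell matches, then
  -- split the remaining bound checks and close each linear goal
  by_cases m0 : c0 = p <;> (try simp [m0]) <;>
    by_cases m1 : c1 = p <;> (try simp [m1]) <;>
      by_cases m2 : c2 = p <;> (try simp [m2]) <;>
        by_cases m3 : c3 = p <;> (try simp [m3]) <;>
          split_ifs <;> omega
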